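-- pv_equiv track=rewrite | github.com/pypi-data/pypi-mirror-39 | packages/jsre/jsre-1.1.1.zip/jsre-1.1.1/jsre/charclass.py | _codeToRangelist
-- ===== SOURCE A (Python) =====
-- SEARCHMASK           = [(0XFFFFFFFFFFFFFFFFFFFFFFFFFFFFFFFF, 128), (0XFFFFFFFFFFFFFFFF, 64), (0XFFFFFFFF, 32), (0XFFFF, 16), (0XFF, 8), (0XF, 4), (0X3, 2), (0X1, 1)]
--
-- def _codeToRangelist(code):
--     ''' expand code into a list of ranges of set bites
--         e.g 0b01000110 -> [(1,2), (6, 6)]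
--     '''
--     res = []
--     bit   = 0
--     while code:
--         for mask, shift in SEARCHMASK:
--             if not (mask & code):
--                 code = code >> shift
--                 bit += shift
--         start = bit
--         for mask, shift in SEARCHMASK:
--             if not (mask & ~code):
--                 code = code >> shift
--                 bit += shift
--         res.append((start, bit - 1))
--     return res
-- ===== SOURCE B (Python) =====
-- def _codeToRangelist(code):
--     ''' expand code into a list of ranges of set bits, by a linear per-bit scan '''
--     res = []
--     i = 0
--     while code:
--         if code & 1:
--             start = i
--             while code & 1:
--                 code >>= 1
--                 i += 1
--             res.append((start, i - 1))
--         else: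
--             code >>= 1
--             i += 1
--     return res
-- ===== Notes on version B (the rewrite author's own statement) =====
-- stated objective: simpler
-- what changed: Replaced the SEARCHMASK binary-search that jumps over runs of zero/one bits with a plain linear per-bit scan that walks the integer one bit at a time, collecting each run of set bits as it goes.
import Mathlib
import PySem

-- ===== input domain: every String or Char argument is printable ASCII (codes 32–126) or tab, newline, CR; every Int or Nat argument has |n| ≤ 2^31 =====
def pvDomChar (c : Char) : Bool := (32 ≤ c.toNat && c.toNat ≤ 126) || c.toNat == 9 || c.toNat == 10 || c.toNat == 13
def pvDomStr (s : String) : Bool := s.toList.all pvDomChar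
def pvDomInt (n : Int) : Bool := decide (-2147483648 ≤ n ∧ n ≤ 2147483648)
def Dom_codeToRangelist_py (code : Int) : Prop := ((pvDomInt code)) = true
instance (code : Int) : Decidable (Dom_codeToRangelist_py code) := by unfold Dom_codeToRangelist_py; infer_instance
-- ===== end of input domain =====

-- B replaces A's mask binary-search over bit runs by a linear per-bit scan; objective: simpler, same exact output on Pre_ (0 ≤ code).

-- ===== PORT A =====
-- the module constant SEARCHMASK
def pvSearchMask : List (Int × Nat) :=
  [(0xFFFFFFFFFFFFFFFFFFFFFFFFFFFFFFFF, 128), (0xFFFFFFFFFFFFFFFF, 64), (0xFFFFFFFF, 32),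
   (0xFFFF, 16), (0xFF, 8), (0xF, 4), (0x3, 2), (0x1, 1)]

-- one step of the first inner for-loop: `if not (mask & code): code >>= shift; bit += shift`
def pvStepZ (st : Int × Int) (ms : Int × Nat) : Int × Int :=
  if PySem.Int.band ms.1 st.1 = 0 then (st.1 >>> ms.2, st.2 + (ms.2 : Int)) else st

-- one step of the second inner for-loop: `if not (mask & ~code): code >>= shift; bit += shift`
def pvStepO (st : Int × Int) (ms : Int × Nat) : Int × Int :=
  if PySem.Int.band ms.1 (Int.not st.1) = 0 then (st.1 >>> ms.2, st.2 + (ms.2 : Int)) else st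

-- A's `while code:` loop; the fuel only makes it total (Python never returns for code < 0, excluded by Pre_)
def pvALoop : Nat → Int → Int → List (Int × Int) → List (Int × Int)
  | 0, _, _, res => res
  | fuel + 1, code, bit, res =>
    if code = 0 then res
    else
      let s1 := pvSearchMask.foldl pvStepZ (code, bit)
      let start := s1.2
      let s2 := pvSearchMask.foldl pvStepO s1
      pvALoop fuel s2.1 s2.2 (res ++ [(start, s2.2 - 1)])

def codeToRangelist_py (code : Int) : List (Int × Int) :=
  pvALoop (code.toNat + 1) code 0 []

-- ===== PORT B =====
-- B's inner `while code & 1: code >>= 1; i += 1`; fuel only for totality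
def pvScanOnes : Nat → Int → Int → Int × Int
  | 0, code, i => (code, i)
  | fuel + 1, code, i =>
    if PySem.Int.band code 1 ≠ 0 then pvScanOnes fuel (code >>> (1:Nat)) (i + 1) else (code, i)

-- B's `while code:` loop
def pvBLoop : Nat → Int → Int → List (Int × Int) → List (Int × Int)
  | 0, _, _, res => res
  | fuel + 1, code, i, res =>
    if code = 0 then res
    else if PySem.Int.band code 1 ≠ 0 then
      let s := pvScanOnes (fuel + 1) code i
      pvBLoop fuel s.1 s.2 (res ++ [(i, s.2 - 1)])
    else pvBLoop fuel (code >>> (1:Nat)) (i + 1) res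

def codeToRangelist_py_alt (code : Int) : List (Int × Int) :=
  pvBLoop (code.toNat + 1) code 0 []

-- ===== PRECONDITION & SPEC =====
-- Pre_ excludes negative code, on which Python A's `while code:` loop never terminates (no return); B diverges there too.
def Pre_codeToRangelist_py (code : Int) : Prop := 0 ≤ code
instance (code : Int) : Decidable (Pre_codeToRangelist_py code) := by unfold Pre_codeToRangelist_py; infer_instance
def pvWitness_codeToRangelist_py : Int := 70

def Spec_codeToRangelist_py (code : Int) (out : List (Int × Int)) : Prop := out = codeToRangelist_py_alt code
instance (code : Int) (out : List (Int × Int)) : Decidable (Spec_codeToRangelist_py code out) := by unfold Spec_codeToRangelist_py; infer_instance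

-- ===== CLAIM (what is proved, stated in full; the proofs are below) =====
def Claim_equal_codeToRangelist_py : Prop := ∀ (code : Int), Dom_codeToRangelist_py code → Pre_codeToRangelist_py code → Spec_codeToRangelist_py code (codeToRangelist_py code)

-- ===== LEMMAS AND PROOFS =====

def pvTZ (n : Nat) : Nat :=
  if n = 0 then 0 else if n % 2 = 0 then pvTZ (n / 2) + 1 else 0
decreasing_by omega

def pvTO (n : Nat) : Nat :=
  if n % 2 = 1 then pvTO (n / 2) + 1 else 0
decreasing_by omega

-- the binary-search tail of SEARCHMASK, as a recursive family
def pvTail : Nat → List (Int × Nat)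
  | 0 => []
  | j + 1 => ((2 : Int) ^ (2 ^ j) - 1, 2 ^ j) :: pvTail j

lemma pvSM_eq : pvSearchMask =
    ((2 : Int) ^ 128 - 1, 128) :: ((2 : Int) ^ 64 - 1, 64) :: ((2 : Int) ^ 32 - 1, 32) :: pvTail 5 := by
  norm_num [pvSearchMask, pvTail]

lemma pvNotCast (x : Nat) : Int.not (x : Int) = Int.negSucc x := by
  cases x <;> rfl

lemma pvBandMask (k : Nat) (x : Nat) :
    PySem.Int.band ((2 ^ k : Int) - 1) (x : Int) = ((x % 2 ^ k : Nat) : Int) := by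
  have h1 : (1 : Int) ≤ 2 ^ k := one_le_pow₀ (by norm_num)
  have ht : ((2 ^ k : Int) - 1).toNat = 2 ^ k - 1 := by
    have : ((2:Int) ^ k) = ((2 ^ k : Nat) : Int) := by push_cast; ring
    omega
  simp only [PySem.Int.band, if_pos (by omega : (0:Int) ≤ (2 ^ k : Int) - 1),
    if_pos (Int.natCast_nonneg x), ht, Int.toNat_natCast]
  rw [Nat.and_comm, Nat.and_two_pow_sub_one_eq_mod]

lemma pvBandNotMask (k : Nat) (x : Nat) :
    PySem.Int.band ((2 ^ k : Int) - 1) (Int.not (x : Int)) = ((2 ^ k - 1 - x % 2 ^ k : Nat) : Int) := by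
  have h1 : (1 : Int) ≤ 2 ^ k := one_le_pow₀ (by norm_num)
  have ht : ((2 ^ k : Int) - 1).toNat = 2 ^ k - 1 := by
    have : ((2:Int) ^ k) = ((2 ^ k : Nat) : Int) := by push_cast; ring
    omega
  rw [pvNotCast]
  have hneg : ¬ (0 : Int) ≤ Int.negSucc x := by simp [Int.negSucc_eq]; omega
  have hval : (-(Int.negSucc x) - 1).toNat = x := by simp [Int.negSucc_eq]
  simp only [PySem.Int.band, if_pos (by omega : (0:Int) ≤ (2 ^ k : Int) - 1), if_neg hneg, ht, hval]
  rw [Nat.and_comm, Nat.and_two_pow_sub_one_eq_mod]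

lemma pvCastShift (x k : Nat) : ((x : Int) >>> k) = ((x >>> k : Nat) : Int) := rfl

lemma pvDvd2Pow {a r m : Nat} (hm : m % 2 = 1) : 2 ^ a ∣ 2 ^ r * m ↔ a ≤ r := by
  constructor
  · intro h
    have hcop : Nat.Coprime (2 ^ a) m :=
      Nat.Coprime.pow_left _ ((Nat.prime_two.coprime_iff_not_dvd).2 (by omega))
    have := (Nat.pow_dvd_pow_iff_le_right (by norm_num : 1 < 2)).1 (hcop.dvd_of_dvd_mul_right h)
    exact this
  · intro h
    exact Dvd.dvd.mul_right (pow_dvd_pow 2 h) m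

lemma pvModPred {E x : Nat} (hE : 1 ≤ E) : x % E = E - 1 ↔ E ∣ x + 1 := by
  constructor
  · intro h
    have hd := Nat.div_add_mod x E
    refine ⟨x / E + 1, ?_⟩
    rw [Nat.mul_add, Nat.mul_one]
    omega
  · rintro ⟨q, hq⟩
    have hq1 : 1 ≤ q := by nlinarith
    have hx : x = E * (q - 1) + (E - 1) := by
      have h1 : E * q = E * (q - 1) + E := by
        conv_lhs => rw [show q = (q - 1) + 1 by omega]
        rw [Nat.mul_add, Nat.mul_one]
      omega
    rw [hx, Nat.mul_add_mod, Nat.mod_eq_of_lt (by omega)]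

lemma pvPredDiv {K Y : Nat} (hK : 1 ≤ K) (hY : 1 ≤ Y) : (K * Y - 1) / K = Y - 1 := by
  have h : K * Y - 1 = (K - 1) + (Y - 1) * K := by
    have h1 : (Y - 1) * K = Y * K - K := by rw [Nat.sub_mul, one_mul]
    have h2 : Y * K = K * Y := Nat.mul_comm _ _
    have h3 : K ≤ K * Y := Nat.le_mul_of_pos_right _ (by omega)
    omega
  rw [h, Nat.add_mul_div_right _ _ (by omega), Nat.div_eq_of_lt (by omega), Nat.zero_add]

lemma pvZT : ∀ (j r m : Nat) (b : Int), m % 2 = 1 → r < 2 ^ j →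
    List.foldl pvStepZ (((2 ^ r * m : Nat) : Int), b) (pvTail j) = (((m : Nat) : Int), b + (r : Int)) := by
  intro j
  induction j with
  | zero =>
    intro r m b hm hr
    have : r = 0 := by omega
    subst this
    simp [pvTail]
  | succ j IH =>
    intro r m b hm hr
    simp only [pvTail, List.foldl_cons]
    by_cases hle : 2 ^ j ≤ r
    · have hsplit : (2:Nat) ^ r = 2 ^ (2 ^ j) * 2 ^ (r - 2 ^ j) := by
        rw [← pow_add]; congr 1; omega
      have hdvd : (2:Nat) ^ (2 ^ j) ∣ 2 ^ r * m := (pvDvd2Pow hm).2 hle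
      have hstep : pvStepZ (((2 ^ r * m : Nat) : Int), b) ((2 : Int) ^ (2 ^ j) - 1, 2 ^ j)
          = (((2 ^ (r - 2 ^ j) * m : Nat) : Int), b + ((2 ^ j : Nat) : Int)) := by
        simp only [pvStepZ]
        rw [pvBandMask, if_pos, pvCastShift]
        · congr 2
          rw [Nat.shiftRight_eq_div_pow, hsplit, Nat.mul_assoc,
            Nat.mul_div_cancel_left _ ((Nat.two_pow_pos _))]
        · rw [Nat.cast_eq_zero, ← Nat.dvd_iff_mod_eq_zero]
          exact hdvd
      rw [hstep, IH (r - 2 ^ j) m _ hm (by omega)]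
      have : b + ((2 ^ j : Nat) : Int) + ((r - 2 ^ j : Nat) : Int) = b + (r : Int) := by
        push_cast [Nat.cast_sub hle]; ring
      rw [this]
    · have hstep : pvStepZ (((2 ^ r * m : Nat) : Int), b) ((2 : Int) ^ (2 ^ j) - 1, 2 ^ j)
          = (((2 ^ r * m : Nat) : Int), b) := by
        simp only [pvStepZ]
        rw [pvBandMask, if_neg]
        rw [Nat.cast_eq_zero, ← Nat.dvd_iff_mod_eq_zero]
        rw [pvDvd2Pow hm]
        omega
      rw [hstep, IH r m b hm (by omega)]

lemma pvOT : ∀ (j r m : Nat) (b : Int), m % 2 = 0 → r < 2 ^ j →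
    List.foldl pvStepO (((2 ^ r * m + 2 ^ r - 1 : Nat) : Int), b) (pvTail j) = (((m : Nat) : Int), b + (r : Int)) := by
  intro j
  induction j with
  | zero =>
    intro r m b hm hr
    have : r = 0 := by omega
    subst this
    simp [pvTail]
  | succ j IH =>
    intro r m b hm hr
    simp only [pvTail, List.foldl_cons]
    have hx1 : (2:Nat) ^ r * m + 2 ^ r - 1 + 1 = 2 ^ r * (m + 1) := by
      have h1 : (1:Nat) ≤ 2 ^ r := Nat.one_le_two_pow
      have h2 : (2:Nat) ^ r * (m + 1) = 2 ^ r * m + 2 ^ r := by rw [Nat.mul_add, Nat.mul_one]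
      omega
    by_cases hle : 2 ^ j ≤ r
    · have hdvd : (2:Nat) ^ (2 ^ j) ∣ (2 ^ r * m + 2 ^ r - 1) + 1 := by
        rw [hx1]; exact (pvDvd2Pow (by omega)).2 hle
      have hmod : (2 ^ r * m + 2 ^ r - 1) % 2 ^ (2 ^ j) = 2 ^ (2 ^ j) - 1 :=
        (pvModPred Nat.one_le_two_pow).2 hdvd
      have hdivval : (2 ^ r * m + 2 ^ r - 1) >>> (2 ^ j) = 2 ^ (r - 2 ^ j) * (m + 1) - 1 := by
        rw [Nat.shiftRight_eq_div_pow]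
        have hsplit : (2:Nat) ^ r = 2 ^ (2 ^ j) * 2 ^ (r - 2 ^ j) := by
          rw [← pow_add]; congr 1; omega
        have : (2:Nat) ^ r * m + 2 ^ r - 1 = 2 ^ (2 ^ j) * (2 ^ (r - 2 ^ j) * (m + 1)) - 1 := by
          rw [← Nat.mul_assoc, ← hsplit, Nat.mul_add, Nat.mul_one]
        rw [this, pvPredDiv Nat.one_le_two_pow
          (Nat.mul_pos (Nat.two_pow_pos _) (by omega))]
      have hrepr : (2:Nat) ^ (r - 2 ^ j) * (m + 1) - 1 = 2 ^ (r - 2 ^ j) * m + 2 ^ (r - 2 ^ j) - 1 := by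
        rw [Nat.mul_add, Nat.mul_one]
      have hstep : pvStepO (((2 ^ r * m + 2 ^ r - 1 : Nat) : Int), b) ((2 : Int) ^ (2 ^ j) - 1, 2 ^ j)
          = (((2 ^ (r - 2 ^ j) * m + 2 ^ (r - 2 ^ j) - 1 : Nat) : Int), b + ((2 ^ j : Nat) : Int)) := by
        simp only [pvStepO]
        rw [pvBandNotMask, if_pos, pvCastShift]
        · rw [hdivval, hrepr]
        · rw [Nat.cast_eq_zero, hmod]
          omega
      rw [hstep, IH (r - 2 ^ j) m _ hm (by omega)]
      have : b + ((2 ^ j : Nat) : Int) + ((r - 2 ^ j : Nat) : Int) = b + (r : Int) := by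
        push_cast [Nat.cast_sub hle]; ring
      rw [this]
    · have hnd : ¬ (2:Nat) ^ (2 ^ j) ∣ (2 ^ r * m + 2 ^ r - 1) + 1 := by
        rw [hx1, pvDvd2Pow (by omega)]
        omega
      have hstep : pvStepO (((2 ^ r * m + 2 ^ r - 1 : Nat) : Int), b) ((2 : Int) ^ (2 ^ j) - 1, 2 ^ j)
          = (((2 ^ r * m + 2 ^ r - 1 : Nat) : Int), b) := by
        simp only [pvStepO]
        rw [pvBandNotMask, if_neg]
        rw [Nat.cast_eq_zero]
        intro h
        have hlt := Nat.mod_lt (2 ^ r * m + 2 ^ r - 1) (Nat.two_pow_pos (2 ^ j))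
        have : (2 ^ r * m + 2 ^ r - 1) % 2 ^ (2 ^ j) = 2 ^ (2 ^ j) - 1 := by
          have h1 : (1:Nat) ≤ 2 ^ (2^j) := Nat.one_le_two_pow
          omega
        exact hnd ((pvModPred Nat.one_le_two_pow).1 this)
      rw [hstep, IH r m b hm (by omega)]

lemma pvOdd {n : Nat} (h : ¬ n % 2 = 0) : n % 2 = 1 := by
  rcases Nat.mod_two_eq_zero_or_one n with h' | h'
  · exact absurd h' h
  · exact h'

lemma pvEvn {n : Nat} (h : ¬ n % 2 = 1) : n % 2 = 0 := by
  rcases Nat.mod_two_eq_zero_or_one n with h' | h'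
  · exact h'
  · exact absurd h' h

lemma pvTZ_repr : ∀ n : Nat, n ≠ 0 → ∃ m, m % 2 = 1 ∧ n = 2 ^ pvTZ n * m := by
  intro n
  induction n using Nat.strong_induction_on with
  | _ n IH =>
    intro hn
    rw [pvTZ]
    simp only [if_neg hn]
    by_cases h2 : n % 2 = 0
    · obtain ⟨m, hm, hrec⟩ := IH (n / 2) (by omega) (by omega)
      refine ⟨m, hm, ?_⟩
      rw [if_pos h2, pow_succ]
      have : 2 ^ pvTZ (n / 2) * 2 * m = 2 * (2 ^ pvTZ (n / 2) * m) := by ring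
      rw [this, ← hrec]
      omega
    · exact ⟨n, pvOdd h2, by rw [if_neg h2, pow_zero, one_mul]⟩

lemma pvTO_repr : ∀ n : Nat, ∃ m, m % 2 = 0 ∧ n = 2 ^ pvTO n * m + 2 ^ pvTO n - 1 := by
  intro n
  induction n using Nat.strong_induction_on with
  | _ n IH =>
    rw [pvTO]
    by_cases h2 : n % 2 = 1
    · obtain ⟨m, hm, hrec⟩ := IH (n / 2) (by omega)
      refine ⟨m, hm, ?_⟩
      rw [if_pos h2, pow_succ]
      have h1 : (1:Nat) ≤ 2 ^ pvTO (n / 2) := Nat.one_le_two_pow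
      have : 2 ^ pvTO (n / 2) * 2 * m = 2 * (2 ^ pvTO (n / 2) * m) := by ring
      rw [this]
      omega
    · exact ⟨n, pvEvn h2, by rw [if_neg h2, pow_zero, one_mul]; omega⟩

lemma pvPowLe31 {t : Nat} (h : 2 ^ t ≤ 2 ^ 31 + 1) : t ≤ 31 := by
  by_contra h'
  have := Nat.pow_le_pow_right (by norm_num : 1 ≤ 2) (show 32 ≤ t by omega)
  norm_num at this
  omega

lemma pvZeroSkip (x : Nat) (b : Int) (hpos : 0 < x) (hub : x ≤ 2 ^ 31) :
    List.foldl pvStepZ ((x : Int), b) pvSearchMask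
      = (((x >>> pvTZ x : Nat) : Int), b + ((pvTZ x : Nat) : Int)) := by
  obtain ⟨m, hm, hx⟩ := pvTZ_repr x (by omega)
  have hzle : pvTZ x ≤ 31 := by
    refine pvPowLe31 ?_
    have h1 : 2 ^ pvTZ x ≤ 2 ^ pvTZ x * m := Nat.le_mul_of_pos_right _ (by omega)
    omega
  have hxlt : x < 2 ^ 32 := lt_of_le_of_lt hub (by norm_num)
  rw [pvSM_eq]
  simp only [List.foldl_cons]
  have noop : ∀ k : Nat, 32 ≤ k → pvStepZ ((x:Int), b) ((2:Int) ^ k - 1, k) = ((x:Int), b) := by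
    intro k hk
    simp only [pvStepZ]
    rw [pvBandMask, if_neg]
    rw [Nat.cast_eq_zero]
    have : x % 2 ^ k = x :=
      Nat.mod_eq_of_lt (lt_of_lt_of_le hxlt (Nat.pow_le_pow_right (by norm_num) hk))
    omega
  rw [noop 128 (by norm_num), noop 64 (by norm_num), noop 32 (by norm_num)]
  have hxc : (x : Int) = ((2 ^ pvTZ x * m : Nat) : Int) := by rw [← hx]
  rw [hxc, pvZT 5 (pvTZ x) m b hm (by omega)]
  have hfin : x >>> pvTZ x = m := by
    set t := pvTZ x
    rw [Nat.shiftRight_eq_div_pow, hx, Nat.mul_div_cancel_left _ (Nat.two_pow_pos _)]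
  rw [hfin]

lemma pvOneSkip (x : Nat) (b : Int) (hodd : x % 2 = 1) (hub : x ≤ 2 ^ 31) :
    List.foldl pvStepO ((x : Int), b) pvSearchMask
      = (((x >>> pvTO x : Nat) : Int), b + ((pvTO x : Nat) : Int)) := by
  obtain ⟨m, hm, hx⟩ := pvTO_repr x
  have h1 : (1:Nat) ≤ 2 ^ pvTO x := Nat.one_le_two_pow
  have hule : pvTO x ≤ 31 := by
    refine pvPowLe31 ?_
    have h2 : 0 ≤ 2 ^ pvTO x * m := Nat.zero_le _
    omega
  have hxlt : x < 2 ^ 32 := lt_of_le_of_lt hub (by norm_num)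
  rw [pvSM_eq]
  simp only [List.foldl_cons]
  have noop : ∀ k : Nat, 32 ≤ k → pvStepO ((x:Int), b) ((2:Int) ^ k - 1, k) = ((x:Int), b) := by
    intro k hk
    simp only [pvStepO]
    rw [pvBandNotMask, if_neg]
    rw [Nat.cast_eq_zero]
    have hmx : x % 2 ^ k = x :=
      Nat.mod_eq_of_lt (lt_of_lt_of_le hxlt (Nat.pow_le_pow_right (by norm_num) hk))
    have h2k : (2:Nat) ^ 32 ≤ 2 ^ k := Nat.pow_le_pow_right (by norm_num) hk
    omega
  rw [noop 128 (by norm_num), noop 64 (by norm_num), noop 32 (by norm_num)]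
  have hxc : (x : Int) = ((2 ^ pvTO x * m + 2 ^ pvTO x - 1 : Nat) : Int) := by rw [← hx]
  rw [hxc, pvOT 5 (pvTO x) m b hm (by omega)]
  have hfin : x >>> pvTO x = m := by
    set t := pvTO x
    rw [Nat.shiftRight_eq_div_pow, hx]
    have he : 2 ^ t * m + 2 ^ t - 1 = 2 ^ t * (m + 1) - 1 := by
      rw [Nat.mul_add, Nat.mul_one]
    rw [he, pvPredDiv h1 (by omega)]
    omega
  rw [hfin]

lemma pvBandOneCast (x : Nat) : PySem.Int.band ((x : Nat) : Int) 1 = ((x % 2 : Nat) : Int) := by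
  rw [PySem.Int.band_one, PySem.Int.mod_eq_emod_of_pos (by norm_num)]
  push_cast
  rfl

lemma pvScan : ∀ (fuel x : Nat) (i : Int), pvTO x ≤ fuel →
    pvScanOnes fuel (x : Int) i = (((x >>> pvTO x : Nat) : Int), i + ((pvTO x : Nat) : Int)) := by
  intro fuel
  induction fuel with
  | zero =>
    intro x i hf
    have h0 : pvTO x = 0 := by omega
    simp [pvScanOnes, h0]
  | succ f IH =>
    intro x i hf
    simp only [pvScanOnes]
    by_cases hodd : x % 2 = 1
    · have hcond : PySem.Int.band ((x:Int)) 1 ≠ 0 := by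
        rw [pvBandOneCast, hodd]; norm_num
      rw [if_pos hcond]
      have hto : pvTO x = pvTO (x / 2) + 1 := by rw [pvTO, if_pos hodd]
      have hsh : ((x:Int) >>> (1:Nat)) = ((x / 2 : Nat) : Int) := by
        rw [pvCastShift, Nat.shiftRight_one]
      rw [hsh, IH (x / 2) (i + 1) (by omega)]
      have hshr : (x / 2) >>> pvTO (x / 2) = x >>> pvTO x := by
        rw [hto, add_comm, Nat.shiftRight_add, Nat.shiftRight_one]
      rw [hshr, hto]
      have : i + 1 + ((pvTO (x / 2) : Nat) : Int) = i + ((pvTO (x / 2) + 1 : Nat) : Int) := by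
        push_cast; ring
      rw [this]
    · have h0 : x % 2 = 0 := pvEvn hodd
      have hcond : ¬ PySem.Int.band ((x:Int)) 1 ≠ 0 := by
        rw [pvBandOneCast, h0]; simp
      rw [if_neg hcond]
      have hto : pvTO x = 0 := by rw [pvTO, if_neg hodd]
      simp [hto]

lemma pvAStepEven (f : Nat) (x : Nat) (b : Int) (res : List (Int × Int))
    (h2 : x % 2 = 0) (hpos : 0 < x) (hub : x ≤ 2 ^ 31) :
    pvALoop f (x : Int) b res = pvALoop f ((x / 2 : Nat) : Int) (b + 1) res := by
  cases f with
  | zero => rfl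
  | succ f =>
    have hne : ((x:Int)) ≠ 0 := Nat.cast_ne_zero.mpr (by omega)
    have hne2 : ((x / 2 : Nat) : Int) ≠ 0 := Nat.cast_ne_zero.mpr (by omega)
    simp only [pvALoop, if_neg hne, if_neg hne2]
    rw [pvZeroSkip x b hpos hub, pvZeroSkip (x / 2) (b + 1) (by omega) (by omega)]
    have hz1 : pvTZ x = pvTZ (x / 2) + 1 := by
      rw [pvTZ, if_neg (by omega : ¬ x = 0), if_pos h2]
    have hsh : (x / 2) >>> pvTZ (x / 2) = x >>> pvTZ x := by
      rw [hz1, add_comm, Nat.shiftRight_add, Nat.shiftRight_one]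
    have hb : b + 1 + ((pvTZ (x / 2) : Nat) : Int) = b + ((pvTZ x : Nat) : Int) := by
      rw [hz1]; push_cast; ring
    rw [hsh, hb]

lemma pvMain : ∀ (n : Nat) (b : Int) (res : List (Int × Int)) (fA fB : Nat),
    n ≤ 2 ^ 31 → n < fA → n < fB →
    pvALoop fA (n : Int) b res = pvBLoop fB (n : Int) b res := by
  intro n
  induction n using Nat.strong_induction_on with
  | _ n IH =>
    intro b res fA fB hub hfA hfB
    obtain ⟨a, rfl⟩ : ∃ a, fA = a + 1 := ⟨fA - 1, by omega⟩
    obtain ⟨g, rfl⟩ : ∃ g, fB = g + 1 := ⟨fB - 1, by omega⟩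
    by_cases hn : n = 0
    · subst hn; simp [pvALoop, pvBLoop]
    by_cases hodd : n % 2 = 1
    · have hne : ((n:Int)) ≠ 0 := Nat.cast_ne_zero.mpr hn
      have hcond : PySem.Int.band ((n:Int)) 1 ≠ 0 := by
        rw [pvBandOneCast, hodd]; norm_num
      simp only [pvALoop, pvBLoop, if_neg hne, if_pos hcond]
      rw [pvZeroSkip n b (by omega) hub]
      have hz0 : pvTZ n = 0 := by
        rw [pvTZ, if_neg hn, if_neg (by simp [hodd])]
      rw [hz0]
      simp only [Nat.shiftRight_zero, Nat.cast_zero, add_zero]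
      rw [pvOneSkip n b hodd hub]
      have hu1 : 1 ≤ pvTO n := by rw [pvTO, if_pos hodd]; omega
      have hun : pvTO n ≤ n := by
        obtain ⟨m, hm, hx⟩ := pvTO_repr n
        have h2u := Nat.lt_two_pow_self (n := pvTO n)
        have h1 : (1:Nat) ≤ 2 ^ pvTO n := Nat.one_le_two_pow
        have h0 : 0 ≤ 2 ^ pvTO n * m := Nat.zero_le _
        omega
      rw [pvScan (g + 1) n b (by omega)]
      have hlt : n >>> pvTO n < n := by
        rw [Nat.shiftRight_eq_div_pow]
        exact Nat.div_lt_self (by omega) (Nat.one_lt_two_pow_iff.mpr (by omega))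
      have hle : n >>> pvTO n ≤ n := Nat.shiftRight_le _ _
      exact IH _ hlt _ _ _ _ (by omega) (by omega) (by omega)
    · have h2 : n % 2 = 0 := pvEvn hodd
      have hne : ((n:Int)) ≠ 0 := Nat.cast_ne_zero.mpr hn
      have hcond : ¬ PySem.Int.band ((n:Int)) 1 ≠ 0 := by
        rw [pvBandOneCast, h2]; simp
      rw [pvAStepEven (a + 1) n b res h2 (by omega) hub]
      simp only [pvBLoop, if_neg hne, if_neg hcond]
      have hsh : ((n:Int) >>> (1:Nat)) = ((n / 2 : Nat) : Int) := by
        rw [pvCastShift, Nat.shiftRight_one]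
      rw [hsh]
      exact IH (n / 2) (by omega) (b + 1) res (a + 1) g (by omega) (by omega) (by omega)


-- ===== VERDICT (by name: the statement is the Claim_ definition above) =====
theorem codeToRangelist_py_spec : Claim_equal_codeToRangelist_py := by
  intro code hdom hpre
  unfold Spec_codeToRangelist_py
  obtain ⟨n, rfl⟩ : ∃ n : Nat, code = (n : Int) := ⟨code.toNat, (Int.toNat_of_nonneg hpre).symm⟩
  have hub : n ≤ 2 ^ 31 := by
    unfold Dom_codeToRangelist_py pvDomInt at hdom
    simp only [decide_eq_true_eq] at hdom
    omega
  unfold codeToRangelist_py codeToRangelist_py_alt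
  rw [Int.toNat_natCast]
  exact pvMain n 0 [] (n + 1) (n + 1) hub (by omega) (by omega)
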